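-- pv_equiv track=rewrite | github.com/redmage123/artemis | src/java_web_framework_detector.py | _detect_caching
-- ===== SOURCE A (Python) =====
-- from typing import Dict, List, Optional, Set
--
-- def _detect_caching(dependencies: Dict[str, str]) -> List[str]:
--     """Detect caching technologies"""
--     caching = []
--
--     if any("redis" in dep for dep in dependencies):
--         caching.append("Redis")
--     if any("hazelcast" in dep for dep in dependencies):
--         caching.append("Hazelcast")
--     if any("ehcache" in dep for dep in dependencies):
--         caching.append("EhCache")
--     if any("caffeine" in dep for dep in dependencies):
--         caching.append("Caffeine")
--
--     return caching
-- ===== SOURCE B (Python) =====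
-- _CACHE_MARKERS = [
--     ("redis", "Redis"),
--     ("hazelcast", "Hazelcast"),
--     ("ehcache", "EhCache"),
--     ("caffeine", "Caffeine"),
-- ]
--
-- def _detect_caching(dependencies):
--     """Detect caching technologies: one pass over the keys collecting found
--     markers, then emit labels in canonical table order."""
--     found = set()
--     for dep in dependencies:
--         for marker, _label in _CACHE_MARKERS:
--             if marker in dep:
--                 found.add(marker)
--     return [label for marker, label in _CACHE_MARKERS if marker in found]
-- ===== Notes on version B (the rewrite author's own statement) =====
-- stated objective: alternative
-- what changed: Replaces four separate any()-scans over the dependency keys with a single table-driven pass that records found markers in a set, then emits labels in fixed table order.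
import Mathlib
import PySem

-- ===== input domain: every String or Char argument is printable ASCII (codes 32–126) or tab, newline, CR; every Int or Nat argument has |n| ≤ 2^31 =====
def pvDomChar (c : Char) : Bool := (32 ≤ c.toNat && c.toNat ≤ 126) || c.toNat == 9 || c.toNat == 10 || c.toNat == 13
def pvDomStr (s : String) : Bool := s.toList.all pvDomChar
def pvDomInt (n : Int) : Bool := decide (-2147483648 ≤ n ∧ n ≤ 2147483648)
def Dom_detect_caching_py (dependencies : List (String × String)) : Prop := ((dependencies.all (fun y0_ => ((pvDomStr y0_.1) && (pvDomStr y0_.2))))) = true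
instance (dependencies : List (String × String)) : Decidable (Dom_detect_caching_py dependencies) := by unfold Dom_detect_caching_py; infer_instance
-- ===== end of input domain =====

-- B replaces A's four separate any()-scans over the keys by one table-driven pass collecting
-- found markers in a set, then emits labels in fixed table order (objective: alternative).

-- ===== PORT A =====
def detect_caching_py (dependencies : List (String × String)) : List String :=
  let caching : List String := []
  let caching := if dependencies.any (fun dep => PySem.Str.isIn "redis" dep.1) then caching ++ ["Redis"] else caching
  let caching := if dependencies.any (fun dep => PySem.Str.isIn "hazelcast" dep.1) then caching ++ ["Hazelcast"] else caching
  let caching := if dependencies.any (fun dep => PySem.Str.isIn "ehcache" dep.1) then caching ++ ["EhCache"] else caching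
  let caching := if dependencies.any (fun dep => PySem.Str.isIn "caffeine" dep.1) then caching ++ ["Caffeine"] else caching
  caching

-- ===== PORT B =====
def pvCacheMarkers : List (String × String) :=
  [("redis", "Redis"), ("hazelcast", "Hazelcast"), ("ehcache", "EhCache"), ("caffeine", "Caffeine")]

def detect_caching_py_alt (dependencies : List (String × String)) : List String :=
  let found : PySem.Set String :=
    dependencies.foldl (fun acc dep =>
      pvCacheMarkers.foldl (fun a2 p =>
        if PySem.Str.isIn p.1 dep.1 then PySem.Set.add a2 p.1 else a2) acc)
      PySem.Set.empty
  (pvCacheMarkers.filter (fun p => PySem.Set.contains found p.1)).map (·.2)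

-- ===== PRECONDITION & SPEC =====
def Spec_detect_caching_py (dependencies : List (String × String)) (out : List String) : Prop := out = detect_caching_py_alt dependencies
instance (dependencies : List (String × String)) (out : List String) : Decidable (Spec_detect_caching_py dependencies out) := by unfold Spec_detect_caching_py; infer_instance

-- ===== CLAIM (what is proved, stated in full; the proofs are below) =====
def Claim_equal_detect_caching_py : Prop := ∀ (dependencies : List (String × String)), Dom_detect_caching_py dependencies → Spec_detect_caching_py dependencies (detect_caching_py dependencies)

-- ===== LEMMAS AND PROOFS =====

theorem contains_add (s : PySem.Set String) (x m : String) :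
    PySem.Set.contains (PySem.Set.add s x) m = (PySem.Set.contains s m || x == m) := by
  by_cases h2 : x = m
  · subst h2
    by_cases h : x ∈ s <;>
      simp [PySem.Set.add, PySem.Set.contains, h, List.mem_append]
  · have hne : m ≠ x := fun hh => h2 hh.symm
    simp only [PySem.Set.add]
    split <;> simp [PySem.Set.contains, h2, hne, List.mem_append]

theorem inner_fold_contains (dep : String) (l : List (String × String))
    (acc : PySem.Set String) (m : String) :
    PySem.Set.contains
        (l.foldl (fun a2 p => if PySem.Str.isIn p.1 dep then PySem.Set.add a2 p.1 else a2) acc) m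
      = (PySem.Set.contains acc m || l.any (fun p => p.1 == m && PySem.Str.isIn p.1 dep)) := by
  induction l generalizing acc with
  | nil => simp
  | cons p t ih =>
    cases h : PySem.Str.isIn p.1 dep <;>
      simp only [List.foldl_cons, List.any_cons, h, if_true, ih, contains_add,
        Bool.and_false, Bool.and_true, Bool.false_or, Bool.or_assoc] <;> simp

theorem outer_fold_contains (deps : List (String × String)) (acc : PySem.Set String) (m : String) :
    PySem.Set.contains
        (deps.foldl (fun acc dep =>
          pvCacheMarkers.foldl (fun a2 p =>
            if PySem.Str.isIn p.1 dep.1 then PySem.Set.add a2 p.1 else a2) acc) acc) m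
      = (PySem.Set.contains acc m ||
          deps.any (fun dep => pvCacheMarkers.any (fun p => p.1 == m && PySem.Str.isIn p.1 dep.1))) := by
  induction deps generalizing acc with
  | nil => simp
  | cons d t ih =>
    simp only [List.foldl_cons, List.any_cons, ih, inner_fold_contains, Bool.or_assoc]

theorem any_markers_redis (dep : String) :
    ([("redis","Redis"),("hazelcast","Hazelcast"),("ehcache","EhCache"),("caffeine","Caffeine")].any
      fun p => p.1 == "redis" && PySem.Str.isIn p.1 dep) = PySem.Str.isIn "redis" dep := by
  simp

theorem any_markers_hazelcast (dep : String) :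
    ([("redis","Redis"),("hazelcast","Hazelcast"),("ehcache","EhCache"),("caffeine","Caffeine")].any
      fun p => p.1 == "hazelcast" && PySem.Str.isIn p.1 dep) = PySem.Str.isIn "hazelcast" dep := by
  simp

theorem any_markers_ehcache (dep : String) :
    ([("redis","Redis"),("hazelcast","Hazelcast"),("ehcache","EhCache"),("caffeine","Caffeine")].any
      fun p => p.1 == "ehcache" && PySem.Str.isIn p.1 dep) = PySem.Str.isIn "ehcache" dep := by
  simp

theorem any_markers_caffeine (dep : String) :
    ([("redis","Redis"),("hazelcast","Hazelcast"),("ehcache","EhCache"),("caffeine","Caffeine")].any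
      fun p => p.1 == "caffeine" && PySem.Str.isIn p.1 dep) = PySem.Str.isIn "caffeine" dep := by
  simp

-- ===== VERDICT (by name: the statement is the Claim_ definition above) =====
set_option maxHeartbeats 1000000 in
theorem detect_caching_py_spec : Claim_equal_detect_caching_py := by
  intro deps _
  unfold Spec_detect_caching_py detect_caching_py detect_caching_py_alt
  simp only [outer_fold_contains]
  simp only [List.filter_cons, List.filter_nil, pvCacheMarkers, PySem.Set.contains,
    PySem.Set.empty, List.contains_nil, Bool.false_or]
  simp only [any_markers_redis, any_markers_hazelcast, any_markers_ehcache, any_markers_caffeine]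
  split_ifs <;> simp
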